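-- pv_equiv track=rewrite | github.com/kalyani12011968-blip/AI-Powered-Smart-Patient-Triage | app89.py | get_sorted_history_by_risk
-- ===== SOURCE A (Python) =====
-- def get_risk_score(risk_level):
--     risk_scores = {
--         "High": 3,
--         "Medium": 2,
--         "Low": 1
--     }
--     return risk_scores.get(risk_level, 0)
--
-- def get_sorted_history_by_risk(history_list, order="descending"):
--     if not history_list:
--         return []
--
--     # Create a list of tuples (risk_score, original_index, record)
--     indexed_records = [(get_risk_score(record.get('risk', 'Low')), i, record)
--                        for i, record in enumerate(history_list)]
--
--     # Sort by risk score
--     reverse = (order == "descending")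
--     indexed_records.sort(key=lambda x: x[0], reverse=reverse)
--
--     # Return just the records in sorted order
--     return [record for _, _, record in indexed_records]
-- ===== SOURCE B (Python) =====
-- def get_sorted_history_by_risk(history_list, order="descending"):
--     # One-pass stable bucket sort over the four discrete risk scores.
--     buckets = ([], [], [], [])
--     for record in history_list:
--         r = record.get('risk', 'Low')
--         s = 3 if r == "High" else 2 if r == "Medium" else 1 if r == "Low" else 0
--         buckets[s].append(record)
--     b0, b1, b2, b3 = buckets
--     if order == "descending":
--         return b3 + b2 + b1 + b0
--     return b0 + b1 + b2 + b3
-- ===== Notes on version B (the rewrite author's own statement) =====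
-- stated objective: alternative
-- what changed: Replaces the decorate-sort-undecorate (stable comparison sort on (score, index, record) tuples) with a single-pass stable bucket sort into four lists, one per discrete risk score, concatenated in the requested order.
import Mathlib
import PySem

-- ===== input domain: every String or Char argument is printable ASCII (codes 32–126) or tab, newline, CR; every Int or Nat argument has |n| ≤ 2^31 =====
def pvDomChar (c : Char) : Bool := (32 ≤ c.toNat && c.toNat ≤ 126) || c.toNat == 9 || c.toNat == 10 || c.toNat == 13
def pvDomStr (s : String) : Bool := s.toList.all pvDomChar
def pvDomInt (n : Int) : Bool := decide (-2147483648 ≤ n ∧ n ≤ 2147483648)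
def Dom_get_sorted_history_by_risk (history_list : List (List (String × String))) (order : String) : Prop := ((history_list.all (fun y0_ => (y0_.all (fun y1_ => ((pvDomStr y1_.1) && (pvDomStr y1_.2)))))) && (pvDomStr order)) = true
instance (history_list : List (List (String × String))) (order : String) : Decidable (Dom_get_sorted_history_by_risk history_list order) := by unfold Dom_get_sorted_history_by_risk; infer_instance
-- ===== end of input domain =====

-- B replaces A's comparison sort (decorate, stable sort by score, undecorate) with a one-pass
-- stable bucket sort over the four discrete risk scores; same return value, proved below.

-- ===== PORT A =====
def pvRiskScore (risk_level : String) : Int :=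
  PySem.Dict.getD (PySem.Dict.mk [("High", 3), ("Medium", 2), ("Low", 1)]) risk_level 0

def get_sorted_history_by_risk (history_list : List (List (String × String))) (order : String) : List (List (String × String)) :=
  if history_list = [] then []
  else
    let indexed_records := (PySem.List.enumerate history_list).map
      (fun p => (pvRiskScore (PySem.Dict.getD (PySem.Dict.mk p.2) "risk" "Low"), p.1, p.2))
    let reverse := order == "descending"
    (PySem.List.sorted indexed_records (fun x => x.1) reverse).map (fun t => t.2.2)

-- ===== PORT B =====
def pvBucketStep (acc : List (List (String × String)) × List (List (String × String)) × List (List (String × String)) × List (List (String × String)))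
    (record : List (String × String)) :
    List (List (String × String)) × List (List (String × String)) × List (List (String × String)) × List (List (String × String)) :=
  let r := PySem.Dict.getD (PySem.Dict.mk record) "risk" "Low"
  if r == "High" then (acc.1, acc.2.1, acc.2.2.1, acc.2.2.2 ++ [record])
  else if r == "Medium" then (acc.1, acc.2.1, acc.2.2.1 ++ [record], acc.2.2.2)
  else if r == "Low" then (acc.1, acc.2.1 ++ [record], acc.2.2.1, acc.2.2.2)
  else (acc.1 ++ [record], acc.2.1, acc.2.2.1, acc.2.2.2)

def get_sorted_history_by_risk_alt (history_list : List (List (String × String))) (order : String) : List (List (String × String)) :=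
  let bs := history_list.foldl pvBucketStep ([], [], [], [])
  if order == "descending" then bs.2.2.2 ++ bs.2.2.1 ++ bs.2.1 ++ bs.1
  else bs.1 ++ bs.2.1 ++ bs.2.2.1 ++ bs.2.2.2

-- ===== PRECONDITION & SPEC =====
def Spec_get_sorted_history_by_risk (history_list : List (List (String × String))) (order : String) (out : List (List (String × String))) : Prop := out = get_sorted_history_by_risk_alt history_list order
instance (history_list : List (List (String × String))) (order : String) (out : List (List (String × String))) : Decidable (Spec_get_sorted_history_by_risk history_list order out) := by unfold Spec_get_sorted_history_by_risk; infer_instance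

-- ===== CLAIM (what is proved, stated in full; the proofs are below) =====
def Claim_equal_get_sorted_history_by_risk : Prop := ∀ (history_list : List (List (String × String))) (order : String), Dom_get_sorted_history_by_risk history_list order → Spec_get_sorted_history_by_risk history_list order (get_sorted_history_by_risk history_list order)

-- ===== LEMMAS AND PROOFS =====

-- the risk score of a record, as both programs compute it
def pvScoreOf (record : List (String × String)) : Int :=
  pvRiskScore (PySem.Dict.getD (PySem.Dict.mk record) "risk" "Low")

-- records of xs whose score is v, in order (one bucket)
def pvFilt {α : Type} (key : α → Int) (v : Int) (xs : List α) : List α :=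
  xs.filter (fun x => key x == v)

lemma pvRiskScore_eq (r : String) :
    pvRiskScore r = if r = "High" then 3 else if r = "Medium" then 2 else if r = "Low" then 1 else 0 := by
  simp only [pvRiskScore, PySem.Dict.getD, PySem.Dict.get?, List.find?]
  split_ifs with h1 h2 h3 <;>
    simp_all [show ∀ a b : String, (a == b) = decide (a = b) from fun a b => rfl, eq_comm]

lemma pvScore_mem (record : List (String × String)) :
    pvScoreOf record = 0 ∨ pvScoreOf record = 1 ∨ pvScoreOf record = 2 ∨ pvScoreOf record = 3 := by
  simp only [pvScoreOf, pvRiskScore_eq]; split_ifs <;> simp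

lemma insertBy_cons {α : Type} (b : α → α → Bool) (x y : α) (ys : List α) :
    PySem.List.insertBy b x (y :: ys) = if b x y then x :: y :: ys else y :: PySem.List.insertBy b x ys := by
  simp [PySem.List.insertBy]

lemma insertBy_append_not {α : Type} (b : α → α → Bool) (x : α) (ys zs : List α)
    (h : ∀ y ∈ ys, b x y = false) :
    PySem.List.insertBy b x (ys ++ zs) = ys ++ PySem.List.insertBy b x zs := by
  induction ys with
  | nil => simp
  | cons y ys ih =>
    simp only [List.cons_append, insertBy_cons, h y (by simp)]
    simp [ih (fun y hy => h y (by simp [hy]))]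

lemma insertBy_all {α : Type} (b : α → α → Bool) (x : α) (ys : List α)
    (h : ∀ y ∈ ys, b x y = true) :
    PySem.List.insertBy b x ys = x :: ys := by
  cases ys with
  | nil => rfl
  | cons y ys => simp [insertBy_cons, h y (by simp)]

lemma mem_pvFilt {α : Type} (key : α → Int) (v : Int) (xs : List α) (y : α)
    (hy : y ∈ pvFilt key v xs) : key y = v := by
  simp only [pvFilt, List.mem_filter, beq_iff_eq] at hy; exact hy.2

lemma pvFilt_append {α : Type} (key : α → Int) (v : Int) (xs : List α) (x : α) :
    pvFilt key v (xs ++ [x]) = pvFilt key v xs ++ (if key x = v then [x] else []) := by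
  simp only [pvFilt, List.filter_append]
  split_ifs with h <;> simp [h]

lemma sorted_four_asc {α : Type} (key : α → Int) (xs : List α)
    (h : ∀ x ∈ xs, key x = 0 ∨ key x = 1 ∨ key x = 2 ∨ key x = 3) :
    PySem.List.sorted xs key false =
      pvFilt key 0 xs ++ pvFilt key 1 xs ++ pvFilt key 2 xs ++ pvFilt key 3 xs := by
  rw [PySem.List.sorted_eq_foldl_insertBy]
  induction xs using List.reverseRecOn with
  | nil => rfl
  | append_singleton xs x ih =>
    rw [List.foldl_append, List.foldl_cons, List.foldl_nil,
        ih (fun y hy => h y (by simp [hy]))]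
    simp only [List.append_assoc]
    rcases h x (by simp) with hk | hk | hk | hk
    · rw [insertBy_append_not _ x _ _
            (by intro y hy; have := mem_pvFilt key 0 xs y hy; simp [hk, this]),
          insertBy_all _ x _ (by
            intro y hy
            rcases List.mem_append.1 hy with hy | hy
            · have := mem_pvFilt key 1 xs y hy; simp [hk, this]
            · rcases List.mem_append.1 hy with hy | hy
              · have := mem_pvFilt key 2 xs y hy; simp [hk, this]
              · have := mem_pvFilt key 3 xs y hy; simp [hk, this])]
      simp [pvFilt_append, hk]
    · rw [insertBy_append_not _ x _ _
            (by intro y hy; have := mem_pvFilt key 0 xs y hy; simp [hk, this]),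
          insertBy_append_not _ x _ _
            (by intro y hy; have := mem_pvFilt key 1 xs y hy; simp [hk, this]),
          insertBy_all _ x _ (by
            intro y hy
            rcases List.mem_append.1 hy with hy | hy
            · have := mem_pvFilt key 2 xs y hy; simp [hk, this]
            · have := mem_pvFilt key 3 xs y hy; simp [hk, this])]
      simp [pvFilt_append, hk]
    · rw [insertBy_append_not _ x _ _
            (by intro y hy; have := mem_pvFilt key 0 xs y hy; simp [hk, this]),
          insertBy_append_not _ x _ _
            (by intro y hy; have := mem_pvFilt key 1 xs y hy; simp [hk, this]),
          insertBy_append_not _ x _ _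
            (by intro y hy; have := mem_pvFilt key 2 xs y hy; simp [hk, this]),
          insertBy_all _ x _
            (by intro y hy; have := mem_pvFilt key 3 xs y hy; simp [hk, this])]
      simp [pvFilt_append, hk]
    · rw [insertBy_append_not _ x _ _
            (by intro y hy; have := mem_pvFilt key 0 xs y hy; simp [hk, this]),
          insertBy_append_not _ x _ _
            (by intro y hy; have := mem_pvFilt key 1 xs y hy; simp [hk, this]),
          insertBy_append_not _ x _ _
            (by intro y hy; have := mem_pvFilt key 2 xs y hy; simp [hk, this]),
          PySem.List.insertBy_of_forall_not_before _ x _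
            (by intro y hy; have := mem_pvFilt key 3 xs y hy; simp [hk, this])]
      simp [pvFilt_append, hk]

lemma sorted_four_desc {α : Type} (key : α → Int) (xs : List α)
    (h : ∀ x ∈ xs, key x = 0 ∨ key x = 1 ∨ key x = 2 ∨ key x = 3) :
    PySem.List.sorted xs key true =
      pvFilt key 3 xs ++ pvFilt key 2 xs ++ pvFilt key 1 xs ++ pvFilt key 0 xs := by
  rw [PySem.List.sorted_rev_eq_foldl_insertBy]
  induction xs using List.reverseRecOn with
  | nil => rfl
  | append_singleton xs x ih =>
    rw [List.foldl_append, List.foldl_cons, List.foldl_nil,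
        ih (fun y hy => h y (by simp [hy]))]
    simp only [List.append_assoc]
    rcases h x (by simp) with hk | hk | hk | hk
    · rw [insertBy_append_not _ x _ _
            (by intro y hy; have := mem_pvFilt key 3 xs y hy; simp [hk, this]),
          insertBy_append_not _ x _ _
            (by intro y hy; have := mem_pvFilt key 2 xs y hy; simp [hk, this]),
          insertBy_append_not _ x _ _
            (by intro y hy; have := mem_pvFilt key 1 xs y hy; simp [hk, this]),
          PySem.List.insertBy_of_forall_not_before _ x _
            (by intro y hy; have := mem_pvFilt key 0 xs y hy; simp [hk, this])]
      simp [pvFilt_append, hk]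
    · rw [insertBy_append_not _ x _ _
            (by intro y hy; have := mem_pvFilt key 3 xs y hy; simp [hk, this]),
          insertBy_append_not _ x _ _
            (by intro y hy; have := mem_pvFilt key 2 xs y hy; simp [hk, this]),
          insertBy_append_not _ x _ _
            (by intro y hy; have := mem_pvFilt key 1 xs y hy; simp [hk, this]),
          insertBy_all _ x _
            (by intro y hy; have := mem_pvFilt key 0 xs y hy; simp [hk, this])]
      simp [pvFilt_append, hk]
    · rw [insertBy_append_not _ x _ _
            (by intro y hy; have := mem_pvFilt key 3 xs y hy; simp [hk, this]),
          insertBy_append_not _ x _ _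
            (by intro y hy; have := mem_pvFilt key 2 xs y hy; simp [hk, this]),
          insertBy_all _ x _ (by
            intro y hy
            rcases List.mem_append.1 hy with hy | hy
            · have := mem_pvFilt key 1 xs y hy; simp [hk, this]
            · have := mem_pvFilt key 0 xs y hy; simp [hk, this])]
      simp [pvFilt_append, hk]
    · rw [insertBy_append_not _ x _ _
            (by intro y hy; have := mem_pvFilt key 3 xs y hy; simp [hk, this]),
          insertBy_all _ x _ (by
            intro y hy
            rcases List.mem_append.1 hy with hy | hy
            · have := mem_pvFilt key 2 xs y hy; simp [hk, this]
            · rcases List.mem_append.1 hy with hy | hy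
              · have := mem_pvFilt key 1 xs y hy; simp [hk, this]
              · have := mem_pvFilt key 0 xs y hy; simp [hk, this])]
      simp [pvFilt_append, hk]

lemma map_snd_filter_enumerate {α : Type} (q : α → Bool) (xs : List α) (s : Int) :
    ((PySem.List.enumerate xs s).filter (fun p => q p.2)).map (fun p => p.2) = xs.filter q := by
  induction xs generalizing s with
  | nil => rfl
  | cons x xs ih =>
    rw [PySem.List.enumerate_cons]
    by_cases hq : q x <;> simp [hq, ih]

lemma pvBucketStep_cases (record : List (String × String))
    (a0 a1 a2 a3 : List (List (String × String))) :
    pvBucketStep (a0, a1, a2, a3) record =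
      (a0 ++ (if pvScoreOf record = 0 then [record] else []),
       a1 ++ (if pvScoreOf record = 1 then [record] else []),
       a2 ++ (if pvScoreOf record = 2 then [record] else []),
       a3 ++ (if pvScoreOf record = 3 then [record] else [])) := by
  unfold pvBucketStep
  simp only [beq_iff_eq]
  simp only [pvScoreOf, pvRiskScore_eq]
  split_ifs <;> simp_all

lemma pvBucket_foldl (hl : List (List (String × String))) :
    ∀ a0 a1 a2 a3,
      hl.foldl pvBucketStep (a0, a1, a2, a3) =
        (a0 ++ pvFilt pvScoreOf 0 hl, a1 ++ pvFilt pvScoreOf 1 hl,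
         a2 ++ pvFilt pvScoreOf 2 hl, a3 ++ pvFilt pvScoreOf 3 hl) := by
  induction hl with
  | nil => intro a0 a1 a2 a3; simp [pvFilt]
  | cons record hl ih =>
    intro a0 a1 a2 a3
    rw [List.foldl_cons, pvBucketStep_cases, ih]
    rcases pvScore_mem record with hk | hk | hk | hk <;>
      simp [pvFilt, List.filter_cons, hk]

theorem get_sorted_history_by_risk_spec : Claim_equal_get_sorted_history_by_risk := by
  intro hl order _
  unfold Spec_get_sorted_history_by_risk get_sorted_history_by_risk get_sorted_history_by_risk_alt
  by_cases hnil : hl = []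
  · subst hnil; simp
  · rw [if_neg hnil]
    have hkeys : ∀ t ∈ (PySem.List.enumerate hl).map
        (fun p => (pvRiskScore (PySem.Dict.getD (PySem.Dict.mk p.2) "risk" "Low"), p.1, p.2)),
        t.1 = 0 ∨ t.1 = 1 ∨ t.1 = 2 ∨ t.1 = 3 := by
      intro t ht
      rcases List.mem_map.1 ht with ⟨p, _, rfl⟩
      exact pvScore_mem p.2
    have hbucket : ∀ v : Int,
        (pvFilt (fun x => x.1) v ((PySem.List.enumerate hl).map
          (fun p => (pvRiskScore (PySem.Dict.getD (PySem.Dict.mk p.2) "risk" "Low"), p.1, p.2)))).map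
            (fun t => t.2.2) = pvFilt pvScoreOf v hl := by
      intro v
      simp only [pvFilt, List.filter_map, List.map_map]
      rw [show ((fun x => x.1 == v) ∘
            (fun p : Int × List (String × String) =>
              (pvRiskScore (PySem.Dict.getD (PySem.Dict.mk p.2) "risk" "Low"), p.1, p.2))) =
          (fun p : Int × List (String × String) => pvScoreOf p.2 == v) from rfl]
      rw [show ((fun t : Int × Int × List (String × String) => t.2.2) ∘
            (fun p : Int × List (String × String) =>
              (pvRiskScore (PySem.Dict.getD (PySem.Dict.mk p.2) "risk" "Low"), p.1, p.2))) =
          (fun p : Int × List (String × String) => p.2) from rfl]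
      exact map_snd_filter_enumerate (fun r => pvScoreOf r == v) hl 0
    rw [pvBucket_foldl hl [] [] [] []]
    cases hrev : (order == "descending") with
    | true =>
      simp only [if_pos rfl]
      rw [sorted_four_desc _ _ hkeys]
      simp only [List.map_append, hbucket]
      simp
    | false =>
      simp only [Bool.false_eq_true, if_false]
      rw [sorted_four_asc _ _ hkeys]
      simp only [List.map_append, hbucket]
      simp
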